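-- pv_equiv track=rewrite | github.com/tonysusf/classic_alg_problems | graph/graph_valid_tree.py | is_valid_tree
-- ===== SOURCE A (Python) =====
-- def is_valid_tree(n, edges):
--     if not n: return False
--     graph = {i: [] for i in range(n)}
--     for u, v in edges:
--         graph[u].append(v)
--         graph[v].append(u)
--     visited = set()
--     return dfs(0, -1, graph, visited) and len(visited) == n
--
-- def dfs(node, parent, graph, visited): # return false if circle found
--     if node in visited: return False # circle found
--     visited.add(node)
--     for neighbor in graph[node]:
--         if neighbor == parent: continue
--         if not dfs(neighbor, node, graph, visited): return False
--     return True
-- ===== SOURCE B (Python) =====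
-- def is_valid_tree(n, edges):
--     if not n: return False
--     graph = {i: [] for i in range(n)}
--     for u, v in edges:
--         graph[u].append(v)
--         graph[v].append(u)
--     visited = {0}
--     stack = [(0, -1, graph[0])]
--     while stack:
--         node, parent, pending = stack.pop()
--         if pending:
--             w, rest = pending[0], pending[1:]
--             stack.append((node, parent, rest))
--             if w != parent:
--                 if w in visited:
--                     return False
--                 visited.add(w)
--                 stack.append((w, node, graph[w]))
--     return len(visited) == n
-- ===== Notes on version B (the rewrite author's own statement) =====
-- stated objective: alternative
-- what changed: Replaces the recursive parent-skip DFS (helper function, call stack, shared visited set) by a single iterative loop over an explicit stack of (node, parent, pending-neighbours) frames that detects cycles at push time, so B needs no recursion (and no helper function / recursion-depth limit).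
import Mathlib
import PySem

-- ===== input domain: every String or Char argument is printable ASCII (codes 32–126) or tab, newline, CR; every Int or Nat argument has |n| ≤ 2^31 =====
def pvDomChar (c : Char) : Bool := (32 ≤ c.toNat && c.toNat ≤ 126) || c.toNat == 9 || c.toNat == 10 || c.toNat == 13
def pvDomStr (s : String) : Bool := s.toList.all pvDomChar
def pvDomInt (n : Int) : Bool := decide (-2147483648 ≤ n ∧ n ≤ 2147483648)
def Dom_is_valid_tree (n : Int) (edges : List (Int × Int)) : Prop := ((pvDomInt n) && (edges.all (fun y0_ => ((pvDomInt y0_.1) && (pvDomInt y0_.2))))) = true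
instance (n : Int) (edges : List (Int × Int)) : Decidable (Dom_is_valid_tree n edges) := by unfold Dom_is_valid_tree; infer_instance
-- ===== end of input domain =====

-- B changes the traversal mechanism only: A's recursive parent-skip DFS becomes an iterative
-- explicit-stack machine (objective: alternative; same O(n+m) cost, no recursion).

-- ===== PORT A =====

-- shared helper: both Pythons build the adjacency dict with the same two lines
-- graph = {i: [] for i in range(n)}; for u, v in edges: graph[u].append(v); graph[v].append(u)
-- (Python raises KeyError on a vertex outside range(n); those inputs are outside Pre_, where
-- Dict.modify's default makes the port total instead.)
def mkGraph (n : Int) (edges : List (Int × Int)) : PySem.Dict Int (List Int) :=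
  edges.foldl
    (fun g p =>
      PySem.Dict.modify (PySem.Dict.modify g p.1 [] (fun l => l ++ [p.2])) p.2 [] (fun l => l ++ [p.1]))
    ((PySem.List.pyRange 0 n 1).foldl (fun d i => PySem.Dict.insert d i []) PySem.Dict.empty)

-- A's recursive dfs. The Nat `fuel` is only a totality guard, threaded through the recursion
-- and returned unchanged up the call chain; `none` = fuel exhausted (never happens at the
-- fuel the top level supplies on inputs satisfying Pre_).
mutual
def dfsA (fuel : Nat) (graph : PySem.Dict Int (List Int)) (node parent : Int)
    (visited : PySem.Set Int) : Option (Bool × PySem.Set Int × Nat) :=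
  if PySem.Set.contains visited node then some (false, visited, fuel)  -- circle found
  else
    match fuel with
    | 0 => none
    | f + 1 => dfsAGo f graph node parent (PySem.Dict.getD graph node []) (PySem.Set.add visited node)
termination_by (fuel, 0)
decreasing_by all_goals (simp only [Prod.lex_def]; omega)

-- the `for neighbor in graph[node]` loop of dfs
def dfsAGo (fuel : Nat) (graph : PySem.Dict Int (List Int)) (node parent : Int)
    (l : List Int) (visited : PySem.Set Int) : Option (Bool × PySem.Set Int × Nat) :=
  match l with
  | [] => some (true, visited, fuel)
  | w :: ws =>
    if w == parent then dfsAGo fuel graph node parent ws visited  -- continue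
    else
      match dfsA fuel graph w node visited with
      | none => none
      | some (false, v', f') => some (false, v', f')  -- return False
      | some (true, v', f') => dfsAGo (min f' fuel) graph node parent ws v'
        -- `min f' fuel` only justifies termination; f' ≤ fuel always (dfsAGo_fuel_le)
termination_by (fuel, l.length + 1)
decreasing_by all_goals (simp only [Prod.lex_def, List.length_cons, true_and]; omega)
end

def is_valid_tree (n : Int) (edges : List (Int × Int)) : Bool :=
  if n == 0 then false
  else
    let graph := mkGraph n edges
    match dfsA (n.toNat + 2) graph 0 (-1) PySem.Set.empty with
    | none => false
    | some (b, visited, _) => b && decide ((PySem.Set.len visited : Int) = n)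

-- ===== PORT B =====

-- B's while-loop over the explicit stack of (node, parent, pending neighbours) frames.
-- `fuel` is the same kind of totality guard (consumed once per pushed child frame).
def runB (fuel : Nat) (graph : PySem.Dict Int (List Int))
    (stack : List (Int × Int × List Int)) (visited : PySem.Set Int) :
    Option (Bool × PySem.Set Int) :=
  match stack with
  | [] => some (true, visited)
  | (node, parent, pending) :: rest =>
    match pending with
    | [] => runB fuel graph rest visited                                   -- frame exhausted, dropped
    | w :: ws =>
      if w == parent then runB fuel graph ((node, parent, ws) :: rest) visited
      else if PySem.Set.contains visited w then some (false, visited)      -- return False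
      else
        match fuel with
        | 0 => none
        | f + 1 =>
          runB f graph ((w, node, PySem.Dict.getD graph w []) :: (node, parent, ws) :: rest)
            (PySem.Set.add visited w)
termination_by (fuel, (stack.map (fun fr => fr.2.2.length + 1)).sum)
decreasing_by all_goals (simp only [Prod.lex_def, List.length_cons, List.map_cons, List.sum_cons, true_and]; omega)

def is_valid_tree_alt (n : Int) (edges : List (Int × Int)) : Bool :=
  if n == 0 then false
  else
    let graph := mkGraph n edges
    match runB (n.toNat + 1) graph [(0, -1, PySem.Dict.getD graph 0 [])]
        (PySem.Set.add PySem.Set.empty 0) with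
    | none => false
    | some (false, _) => false
    | some (true, visited) => decide ((PySem.Set.len visited : Int) = n)

-- ===== PRECONDITION & SPEC =====

-- Pre_ excludes exactly the inputs where Python A raises KeyError: a negative n (dfs looks up
-- graph[0] in an empty dict) or, for 0 < n, an edge endpoint outside range(n). n = 0 is kept:
-- A returns False there whatever the edges are.
def Pre_is_valid_tree (n : Int) (edges : List (Int × Int)) : Prop :=
  n = 0 ∨ (0 < n ∧ ∀ p ∈ edges, 0 ≤ p.1 ∧ p.1 < n ∧ 0 ≤ p.2 ∧ p.2 < n)
instance (n : Int) (edges : List (Int × Int)) : Decidable (Pre_is_valid_tree n edges) := by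
  unfold Pre_is_valid_tree; infer_instance

def pvWitness_is_valid_tree : Int × (List (Int × Int)) := (3, [(0, 1), (1, 2)])

def Spec_is_valid_tree (n : Int) (edges : List (Int × Int)) (out : Bool) : Prop := out = is_valid_tree_alt n edges
instance (n : Int) (edges : List (Int × Int)) (out : Bool) : Decidable (Spec_is_valid_tree n edges out) := by unfold Spec_is_valid_tree; infer_instance

-- ===== CLAIM (what is proved, stated in full; the proofs are below) =====
def Claim_equal_is_valid_tree : Prop := ∀ (n : Int) (edges : List (Int × Int)), Dom_is_valid_tree n edges → Pre_is_valid_tree n edges → Spec_is_valid_tree n edges (is_valid_tree n edges)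

-- ===== LEMMAS AND PROOFS =====

theorem dfsAGo_nil (fuel : Nat) (graph : PySem.Dict Int (List Int)) (node parent : Int)
    (visited : PySem.Set Int) :
    dfsAGo fuel graph node parent [] visited = some (true, visited, fuel) := by
  rw [dfsAGo.eq_def]

theorem runB_nil (fuel : Nat) (graph : PySem.Dict Int (List Int)) (visited : PySem.Set Int) :
    runB fuel graph [] visited = some (true, visited) := by
  rw [runB.eq_def]

-- the fuel a call returns never exceeds the fuel it was given
theorem dfsAGo_fuel_le : ∀ (fuel : Nat) (l : List Int)
    (graph : PySem.Dict Int (List Int)) (node parent : Int) (visited : PySem.Set Int)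
    (b : Bool) (v : PySem.Set Int) (f' : Nat),
    dfsAGo fuel graph node parent l visited = some (b, v, f') → f' ≤ fuel := by
  intro fuel
  induction fuel using Nat.strong_induction_on with
  | _ fuel IH =>
    intro l
    induction l with
    | nil =>
      intro graph node parent visited b v f' h
      rw [dfsAGo_nil] at h
      simp at h
      omega
    | cons w ws IHl =>
      intro graph node parent visited b v f' h
      rw [dfsAGo.eq_def] at h
      dsimp only at h
      by_cases hp : (w == parent) = true
      · rw [if_pos hp] at h
        exact IHl graph node parent visited b v f' h
      · rw [if_neg hp] at h
        rw [dfsA.eq_def] at h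
        by_cases hv : PySem.Set.contains visited w = true
        · rw [if_pos hv] at h
          simp at h
          omega
        · rw [if_neg hv] at h
          cases fuel with
          | zero => simp at h
          | succ g =>
            dsimp only at h
            cases hr : dfsAGo g graph w node (PySem.Dict.getD graph w []) (PySem.Set.add visited w) with
            | none => rw [hr] at h; simp at h
            | some r =>
              obtain ⟨b1, v1, f1⟩ := r
              have hf1 : f1 ≤ g := IH g (by omega) _ graph w node (PySem.Set.add visited w) b1 v1 f1 hr
              rw [hr] at h
              cases b1 with
              | false => simp at h; omega
              | true =>
                dsimp only at h
                have hmin : min f1 (g + 1) = f1 := by omega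
                rw [hmin] at h
                have := IH f1 (by omega) ws graph node parent v1 b v f' h
                omega

-- the machine run with the frame (node, parent, l) on top simulates dfs's neighbour loop,
-- then keeps running the remaining frames with the returned fuel
theorem runB_sim : ∀ (fuel : Nat) (l : List Int) (graph : PySem.Dict Int (List Int))
    (node parent : Int) (visited : PySem.Set Int) (rest : List (Int × Int × List Int)),
    runB fuel graph ((node, parent, l) :: rest) visited =
      match dfsAGo fuel graph node parent l visited with
      | none => none
      | some (false, v', _) => some (false, v')
      | some (true, v', f') => runB f' graph rest v' := by
  intro fuel
  induction fuel using Nat.strong_induction_on with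
  | _ fuel IH =>
    intro l
    induction l with
    | nil =>
      intro graph node parent visited rest
      rw [runB.eq_def, dfsAGo_nil]
    | cons w ws IHl =>
      intro graph node parent visited rest
      rw [runB.eq_def]
      dsimp only
      rw [dfsAGo.eq_def]
      dsimp only
      by_cases hp : (w == parent) = true
      · rw [if_pos hp, if_pos hp]
        exact IHl graph node parent visited rest
      · rw [if_neg hp, if_neg hp]
        rw [dfsA.eq_def]
        by_cases hv : PySem.Set.contains visited w = true
        · rw [if_pos hv, if_pos hv]
        · rw [if_neg hv, if_neg hv]
          cases fuel with
          | zero => rfl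
          | succ g =>
            dsimp only
            rw [IH g (by omega) (PySem.Dict.getD graph w []) graph w node
              (PySem.Set.add visited w) ((node, parent, ws) :: rest)]
            cases hr : dfsAGo g graph w node (PySem.Dict.getD graph w []) (PySem.Set.add visited w) with
            | none => rfl
            | some r =>
              obtain ⟨b1, v1, f1⟩ := r
              have hf1 : f1 ≤ g := dfsAGo_fuel_le g _ graph w node _ b1 v1 f1 hr
              cases b1 with
              | false => rfl
              | true =>
                dsimp only
                have hmin : min f1 (g + 1) = f1 := by omega
                rw [hmin]
                exact IH f1 (by omega) ws graph node parent v1 rest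

-- the two ports agree on every input (fuel exhaustion included: the guards are aligned)
theorem ports_agree (n : Int) (edges : List (Int × Int)) :
    is_valid_tree n edges = is_valid_tree_alt n edges := by
  rw [is_valid_tree, is_valid_tree_alt]
  by_cases h0 : (n == 0) = true
  · rw [if_pos h0, if_pos h0]
  · rw [if_neg h0, if_neg h0]
    dsimp only
    rw [dfsA.eq_def]
    have hc : PySem.Set.contains PySem.Set.empty (0 : Int) = false := rfl
    rw [hc]
    dsimp only [Bool.false_eq_true, if_false]
    rw [runB_sim]
    cases hr : dfsAGo (n.toNat + 1) (mkGraph n edges) 0 (-1)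
        (PySem.Dict.getD (mkGraph n edges) 0 []) (PySem.Set.add PySem.Set.empty 0) with
    | none => rfl
    | some r =>
      obtain ⟨b, v, f⟩ := r
      cases b with
      | false => rfl
      | true => simp [runB_nil]

-- ===== VERDICT (by name: the statement is the Claim_ definition above) =====
theorem is_valid_tree_spec : Claim_equal_is_valid_tree := by
  intro n edges _ _
  unfold Spec_is_valid_tree
  exact ports_agree n edges
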